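-- pv_equiv track=rewrite | github.com/SauravSinha76/scaler | class21/check_pair_diff.py | solve
-- ===== SOURCE A (Python) =====
-- def solve(A,B):
--     uniq = set()
--     for i in range(len(A)):
--         b1 = A[i] - B
--         b2 = A[i] + B
--
--         if b1 in uniq:
--             return 1
--
--         if b2 in uniq:
--             return 1
--
--         uniq.add(A[i])
--     return 0
-- ===== SOURCE B (Python) =====
-- def solve(A, B):
--     d = abs(B)
--     s = sorted(A)
--     n = len(s)
--     i = j = 0
--     while i < n and j < n:
--         gap = s[j] - s[i]
--         if i != j and gap == d:
--             return 1
--         if gap < d or i == j: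
--             j += 1
--         else:
--             i += 1
--     return 0
-- ===== Notes on version B (the rewrite author's own statement) =====
-- stated objective: alternative
-- what changed: Replaces the single-pass hash-set membership loop by sort-then-two-pointer: B sorts a copy of A and sweeps two monotone indices over the sorted list looking for a gap of abs(B) (which also catches duplicates when B==0), instead of testing x-B/x+B against a growing set.
import Mathlib
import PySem

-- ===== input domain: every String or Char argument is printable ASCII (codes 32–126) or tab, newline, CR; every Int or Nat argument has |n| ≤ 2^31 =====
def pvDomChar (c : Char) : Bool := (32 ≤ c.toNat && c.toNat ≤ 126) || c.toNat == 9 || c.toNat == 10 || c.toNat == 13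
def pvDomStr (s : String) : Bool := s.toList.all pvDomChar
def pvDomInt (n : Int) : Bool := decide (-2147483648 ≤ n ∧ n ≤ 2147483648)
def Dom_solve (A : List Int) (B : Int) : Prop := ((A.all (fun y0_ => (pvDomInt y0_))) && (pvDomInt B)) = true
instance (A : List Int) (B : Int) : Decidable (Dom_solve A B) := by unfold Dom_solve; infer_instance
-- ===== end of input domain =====

-- B replaces A's incremental hash-set membership loop by sort + monotone two-pointer
-- scan over a sorted copy of A (objective: alternative algorithm, not claimed faster).

-- ===== PORT A =====
-- the loop 'for i in range(len(A)): …' with the running set 'uniq' and early return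
def solveLoopA (B : Int) : List Int → PySem.Set Int → Int
  | [], _ => 0
  | x :: rest, uniq =>
    if uniq.contains (x - B) then 1
    else if uniq.contains (x + B) then 1
    else solveLoopA B rest (uniq.add x)

def solve (A : List Int) (B : Int) : Int := solveLoopA B A PySem.Set.empty

-- ===== PORT B =====
-- the 'while i < n and j < n' two-pointer loop of Source B; s[i]/s[j] are always in
-- range under the loop guard, so the guarded getElem is exact for Python's s[i]
def loopB (s : List Int) (d : Int) (i j : Nat) : Int :=
  if h : i < s.length ∧ j < s.length then
    let gap := s[j]'h.2 - s[i]'h.1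
    if i ≠ j ∧ gap = d then 1
    else if gap < d ∨ i = j then loopB s d i (j + 1)
    else loopB s d (i + 1) j
  else 0
termination_by (s.length - i) + (s.length - j)
decreasing_by all_goals omega

def solve_alt (A : List Int) (B : Int) : Int :=
  let d : Int := |B|
  let s : List Int := PySem.List.sorted A (fun x => x) false
  loopB s d 0 0

-- ===== PRECONDITION & SPEC =====
def Spec_solve (A : List Int) (B : Int) (out : Int) : Prop := out = solve_alt A B
instance (A : List Int) (B : Int) (out : Int) : Decidable (Spec_solve A B out) := by unfold Spec_solve; infer_instance

-- ===== CLAIM (what is proved, stated in full; the proofs are below) =====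
def Claim_equal_solve : Prop := ∀ (A : List Int) (B : Int), Dom_solve A B → Spec_solve A B (solve A B)

-- ===== LEMMAS AND PROOFS =====

-- a pair at distinct positions differing by B (or -B), as a Boolean recursive predicate
def PairPP (B : Int) : List Int → Bool
  | [] => false
  | x :: r => (r.contains (x - B) || r.contains (x + B)) || PairPP B r

theorem pairPP_cons (B x : Int) (r : List Int) :
    PairPP B (x :: r) = true ↔ ((x - B) ∈ r ∨ (x + B) ∈ r) ∨ PairPP B r = true := by
  simp [PairPP]

theorem solveLoopA_char (B : Int) (xs : List Int) (u : PySem.Set Int) :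
    solveLoopA B xs u =
      if (∃ x ∈ xs, (x - B) ∈ u ∨ (x + B) ∈ u) ∨ PairPP B xs = true then 1 else 0 := by
  induction xs generalizing u with
  | nil => simp [solveLoopA, PairPP]
  | cons x r ih =>
    simp only [solveLoopA, ih]
    by_cases h1 : (x - B) ∈ u <;> by_cases h2 : (x + B) ∈ u <;>
      simp [h1, h2, PySem.Set.mem_add, pairPP_cons, List.mem_cons]
    refine if_congr ?_ rfl rfl
    constructor
    · rintro (⟨y, hy, (h|h) | (h|h)⟩ | h)
      · exact Or.inl ⟨y, hy, Or.inl h⟩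
      · refine Or.inr (Or.inl (Or.inr ?_))
        have hx : x + B = y := by omega
        rw [hx]; exact hy
      · exact Or.inl ⟨y, hy, Or.inr h⟩
      · refine Or.inr (Or.inl (Or.inl ?_))
        have hx : x - B = y := by omega
        rw [hx]; exact hy
      · exact Or.inr (Or.inr h)
    · rintro (⟨y, hy, (h|h)⟩ | (h|h) | h)
      · exact Or.inl ⟨y, hy, Or.inl (Or.inl h)⟩
      · exact Or.inl ⟨y, hy, Or.inr (Or.inl h)⟩
      · exact Or.inl ⟨x - B, h, Or.inr (Or.inr (by omega))⟩
      · exact Or.inl ⟨x + B, h, Or.inl (Or.inr (by omega))⟩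
      · exact Or.inr h

theorem solve_char (A : List Int) (B : Int) :
    solve A B = if PairPP B A = true then 1 else 0 := by
  unfold solve
  rw [solveLoopA_char]
  simp [PySem.Set.empty]

theorem pairPP_zero (A : List Int) : PairPP 0 A = true ↔ ¬ A.Nodup := by
  induction A with
  | nil => simp [PairPP]
  | cons x r ih => rw [pairPP_cons]; simp [List.nodup_cons, ih]; tauto

theorem pairPP_pos (B d : Int) (hd : d = |B|) (hpos : 0 < d) (A : List Int) :
    PairPP B A = true ↔ ∃ x ∈ A, (x + d) ∈ A := by
  have hB : B = d ∨ B = -d := by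
    rcases abs_cases B with ⟨h, _⟩ | ⟨h, _⟩ <;> omega
  induction A with
  | nil => simp [PairPP]
  | cons a r ih =>
    rw [pairPP_cons]
    constructor
    · rintro ((h | h) | h)
      · rcases hB with hB | hB
        · exact ⟨a - d, List.mem_cons_of_mem a (by rwa [hB] at h),
            by simp⟩
        · refine ⟨a, List.mem_cons_self, List.mem_cons_of_mem a ?_⟩
          have : a + d = a - B := by omega
          rwa [this]
      · rcases hB with hB | hB
        · refine ⟨a, List.mem_cons_self, List.mem_cons_of_mem a ?_⟩
          have : a + d = a + B := by omega
          rwa [this]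
        · exact ⟨a + B, List.mem_cons_of_mem a h,
            by have hx : a + B + d = a := by omega
               rw [hx]; exact List.mem_cons_self⟩
      · obtain ⟨x, hx, hxd⟩ := ih.mp h
        exact ⟨x, List.mem_cons_of_mem a hx, List.mem_cons_of_mem a hxd⟩
    · rintro ⟨x, hx, hxd⟩
      rcases List.mem_cons.mp hx with rfl | hx <;>
        rcases List.mem_cons.mp hxd with he | hxd
      · omega
      · rcases hB with hB | hB
        · exact Or.inl (Or.inr (by rwa [hB]))
        · refine Or.inl (Or.inl ?_)
          have : x - B = x + d := by omega
          rwa [this]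
      · rcases hB with hB | hB
        · refine Or.inl (Or.inl ?_)
          have : a - B = x := by omega
          rwa [this]
        · refine Or.inl (Or.inr ?_)
          have : a + B = x := by omega
          rwa [this]
      · exact Or.inr (ih.mpr ⟨x, hx, hxd⟩)

-- "some pair of positions p < q in s differs by exactly d"
def Good (d : Int) (s : List Int) : Prop :=
  ∃ p q, p < q ∧ q < s.length ∧ s.getD q 0 - s.getD p 0 = d

theorem getD_mono (s : List Int) (hs : s.Pairwise (· ≤ ·))
    {p q : Nat} (hpq : p ≤ q) (hq : q < s.length) :
    s.getD p 0 ≤ s.getD q 0 := by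
  rcases Nat.lt_or_ge p q with h | h
  · have := (List.pairwise_iff_getElem.mp hs) p q (by omega) hq h
    simpa [List.getD_eq_getElem, hq, show p < s.length by omega] using this
  · have : p = q := by omega
    simp [this]

theorem loopB_eq (s : List Int) (d : Int) (i j : Nat)
    (h : i < s.length ∧ j < s.length) :
    loopB s d i j =
      if i ≠ j ∧ s[j]'h.2 - s[i]'h.1 = d then 1
      else if s[j]'h.2 - s[i]'h.1 < d ∨ i = j then loopB s d i (j + 1)
      else loopB s d (i + 1) j := by
  rw [loopB, dif_pos h]

theorem loopB_stop (s : List Int) (d : Int) (i j : Nat)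
    (h : ¬ (i < s.length ∧ j < s.length)) : loopB s d i j = 0 := by
  rw [loopB, dif_neg h]

-- soundness: the loop returns 1 only when a valid pair exists
theorem loopB_one_good (s : List Int) (d : Int) (i j : Nat)
    (hij : i ≤ j) (h1 : loopB s d i j = 1) : Good d s := by
  induction i, j using loopB.induct s d with
  | case1 i j h gap hret =>
    refine ⟨i, j, ?_, h.2, ?_⟩
    · omega
    · simp only [List.getD_eq_getElem, h.1, h.2]
      omega
  | case2 i j h gap hret hbr ih =>
    rw [loopB_eq s d i j h, if_neg hret, if_pos hbr] at h1
    exact ih (by omega) h1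
  | case3 i j h gap hret hbr ih =>
    rw [loopB_eq s d i j h, if_neg hret, if_neg hbr] at h1
    have : i ≠ j := by tauto
    exact ih (by omega) h1
  | case4 i j h =>
    rw [loopB_stop s d i j h] at h1
    exact absurd h1 (by norm_num)

-- completeness: if a valid pair lies ahead of both pointers, the loop finds one
theorem loopB_complete (s : List Int) (hs : s.Pairwise (· ≤ ·)) (d : Int)
    (i j : Nat) (hij : i ≤ j)
    (p q : Nat) (hip : i ≤ p) (hjq : j ≤ q) (hpq : p < q) (hq : q < s.length)
    (hgap : s.getD q 0 - s.getD p 0 = d) : loopB s d i j = 1 := by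
  induction i, j using loopB.induct s d generalizing p q with
  | case1 i j h gap hret => rw [loopB_eq s d i j h, if_pos hret]
  | case2 i j h gap hret hbr ih =>
    rw [loopB_eq s d i j h, if_neg hret, if_pos hbr]
    have hjq' : j ≠ q := by
      intro he
      rcases hbr with hlt | hej
      · have hm : s.getD i 0 ≤ s.getD p 0 := getD_mono s hs (by omega) (by omega)
        have hlt' : s.getD j 0 - s.getD i 0 < d := by
          have e1 : s[j]'h.2 = s.getD j 0 := by simp [h.2]
          have e2 : s[i]'h.1 = s.getD i 0 := by simp [h.1]
          rw [← e1, ← e2]; exact hlt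
        have hq' : s.getD j 0 = s.getD q 0 := by rw [he]
        omega
      · omega
    exact ih (by omega) p q (by omega) (by omega) hpq hq hgap
  | case3 i j h gap hret hbr ih =>
    rw [loopB_eq s d i j h, if_neg hret, if_neg hbr]
    have hinej : i ≠ j := by tauto
    have hgt : ¬ (s[j]'h.2 - s[i]'h.1 < d) := by tauto
    have hip' : i ≠ p := by
      intro he
      have hm : s.getD j 0 ≤ s.getD q 0 := getD_mono s hs (by omega) hq
      have e1 : s[j]'h.2 = s.getD j 0 := by simp [h.2]
      have e2 : s[i]'h.1 = s.getD i 0 := by simp [h.1]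
      have hgt' : ¬ (s[j]'h.2 - s[i]'h.1 < d) := hgt
      have hgd : s[j]'h.2 - s[i]'h.1 ≠ d := fun hde => hret ⟨hinej, hde⟩
      have hi' : s.getD i 0 = s.getD p 0 := by rw [he]
      omega
    exact ih (by omega) p q (by omega) (by omega) hpq hq hgap
  | case4 i j h =>
    exact absurd ⟨by omega, by omega⟩ h

-- the loop only ever returns 0 or 1
theorem loopB_zero_or_one (s : List Int) (d : Int) (i j : Nat) :
    loopB s d i j = 0 ∨ loopB s d i j = 1 := by
  induction i, j using loopB.induct s d with
  | case1 i j h gap hret => rw [loopB_eq s d i j h, if_pos hret]; exact Or.inr rfl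
  | case2 i j h gap hret hbr ih =>
    rw [loopB_eq s d i j h, if_neg hret, if_pos hbr]; exact ih
  | case3 i j h gap hret hbr ih =>
    rw [loopB_eq s d i j h, if_neg hret, if_neg hbr]; exact ih
  | case4 i j h => exact Or.inl (loopB_stop s d i j h)

theorem loopB_good_neg (s : List Int) (d : Int) (hg : ¬ Good d s) :
    loopB s d 0 0 = 0 := by
  rcases loopB_zero_or_one s d 0 0 with h | h
  · exact h
  · exact absurd (loopB_one_good s d 0 0 (by omega) h) hg

theorem good_zero (s : List Int) : Good 0 s ↔ ¬ s.Nodup := by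
  constructor
  · rintro ⟨p, q, hpq, hq, hgap⟩
    rw [List.nodup_iff_getElem?_ne_getElem?]
    intro hall
    apply hall p q hpq hq
    rw [List.getElem?_eq_getElem (show p < s.length by omega),
        List.getElem?_eq_getElem hq]
    have e1 : s[p]'(show p < s.length by omega) = s.getD p 0 := by
      simp [show p < s.length by omega]
    have e2 : s[q]'hq = s.getD q 0 := by simp [hq]
    exact congrArg some (by omega)
  · intro hnd
    rw [List.nodup_iff_getElem?_ne_getElem?] at hnd
    push Not at hnd
    obtain ⟨p, q, hpq, hq, he⟩ := hnd
    refine ⟨p, q, hpq, hq, ?_⟩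
    rw [List.getElem?_eq_getElem (show p < s.length by omega),
        List.getElem?_eq_getElem hq] at he
    have e1 : s[p]'(show p < s.length by omega) = s.getD p 0 := by
      simp [show p < s.length by omega]
    have e2 : s[q]'hq = s.getD q 0 := by simp [hq]
    have := Option.some.inj he
    omega

theorem good_pos (s : List Int) (hs : s.Pairwise (· ≤ ·)) (d : Int) (hd : 0 < d) :
    Good d s ↔ ∃ x ∈ s, (x + d) ∈ s := by
  constructor
  · rintro ⟨p, q, hpq, hq, hgap⟩
    have hp : p < s.length := by omega
    refine ⟨s[p]'hp, List.getElem_mem hp, ?_⟩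
    have e1 : s[p]'hp = s.getD p 0 := by simp [hp]
    have e2 : s[q]'hq = s.getD q 0 := by simp [hq]
    have : s[p]'hp + d = s[q]'hq := by omega
    rw [this]
    exact List.getElem_mem hq
  · rintro ⟨x, hx, hxd⟩
    obtain ⟨p, hp, hxe⟩ := List.mem_iff_getElem.mp hx
    obtain ⟨q, hq, hde⟩ := List.mem_iff_getElem.mp hxd
    have e1 : s[p]'hp = s.getD p 0 := by simp [hp]
    have e2 : s[q]'hq = s.getD q 0 := by simp [hq]
    have hlt : p < q := by
      rcases Nat.lt_trichotomy p q with h | h | h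
      · exact h
      · subst h; omega
      · have := getD_mono s hs (Nat.le_of_lt h) hp
        omega
    exact ⟨p, q, hlt, hq, by omega⟩

theorem solve_alt_char (A : List Int) (B : Int) :
    solve_alt A B = if PairPP B A = true then 1 else 0 := by
  have hrw : solve_alt A B = loopB (PySem.List.sorted A (fun x => x) false) |B| 0 0 := rfl
  rw [hrw]
  have hs : (PySem.List.sorted A (fun x => x) false).Pairwise (· ≤ ·) :=
    PySem.List.sorted_pairwise A (fun x => x)
  have hperm : (PySem.List.sorted A (fun x => x) false).Perm A :=
    PySem.List.sorted_perm A (fun x => x) false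
  by_cases hp : PairPP B A = true
  · rw [if_pos hp]
    have hg : Good |B| (PySem.List.sorted A (fun x => x) false) := by
      by_cases hB : B = 0
      · subst hB
        simp only [abs_zero]
        rw [good_zero]
        exact fun hn => (pairPP_zero A).mp hp (hperm.nodup_iff.mp hn)
      · have hpos : (0 : Int) < |B| := abs_pos.mpr hB
        rw [good_pos _ hs _ hpos]
        obtain ⟨x, hx, hxd⟩ := (pairPP_pos B |B| rfl hpos A).mp hp
        exact ⟨x, hperm.mem_iff.mpr hx, hperm.mem_iff.mpr hxd⟩
    obtain ⟨p, q, hpq, hq, hgap⟩ := hg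
    exact loopB_complete _ hs _ 0 0 (by omega) p q (by omega) (by omega) hpq hq hgap
  · rw [if_neg hp]
    refine loopB_good_neg _ _ ?_
    intro hg
    apply hp
    by_cases hB : B = 0
    · subst hB
      simp only [abs_zero] at hg
      rw [pairPP_zero]
      exact fun hn => (good_zero _).mp hg (hperm.nodup_iff.mpr hn)
    · have hpos : (0 : Int) < |B| := abs_pos.mpr hB
      obtain ⟨x, hx, hxd⟩ := (good_pos _ hs _ hpos).mp hg
      exact (pairPP_pos B |B| rfl hpos A).mpr
        ⟨x, hperm.mem_iff.mp hx, hperm.mem_iff.mp hxd⟩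

-- ===== VERDICT (by name: the statement is the Claim_ definition above) =====
theorem solve_spec : Claim_equal_solve := by
  intro A B _
  unfold Spec_solve
  rw [solve_char, solve_alt_char]
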